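-- pv_equiv track=rewrite | github.com/aharneish/daily-job-digest | daily_job_digest.py | _clean_resume_text
-- ===== SOURCE A (Python) =====
-- def _clean_resume_text(resume_text: str) -> str:
--     """Clean and prepare resume text for processing"""
--     # Remove excessive whitespace while preserving structure
--     lines = resume_text.split('\n')
--     cleaned_lines = []
--
--     for line in lines:
--         cleaned_line = line.strip()
--         if cleaned_line:  # Keep non-empty lines
--             cleaned_lines.append(cleaned_line)
--         elif cleaned_lines and cleaned_lines[-1]:  # Add single empty line for spacing
--             cleaned_lines.append('')
--
--     return '\n'.join(cleaned_lines)
-- ===== SOURCE B (Python) =====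
-- def _clean_resume_text(resume_text: str) -> str:
--     """Clean and prepare resume text for processing (run-based rewrite)."""
--     stripped = [line.strip() for line in resume_text.split('\n')]
--     out = []
--     i = 0
--     n = len(stripped)
--     while i < n:
--         # find the end of the maximal run of equally-empty lines starting at i
--         empty = stripped[i] == ''
--         j = i
--         while j < n and (stripped[j] == '') == empty:
--             j += 1
--         if empty:
--             if out:  # drop leading blanks, collapse a blank run to one separator
--                 out.append('')
--         else:
--             out.extend(stripped[i:j])
--         i = j
--     return '\n'.join(out)
-- ===== Notes on version B (the rewrite author's own statement) =====
-- stated objective: alternative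
-- what changed: Replaces the per-line state-machine fold (checking the last emitted element) with a run-based scan: strip all lines first, then walk maximal runs of equally-empty lines, extending the output with a non-empty run and emitting at most one blank line per blank run.
import Mathlib
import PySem

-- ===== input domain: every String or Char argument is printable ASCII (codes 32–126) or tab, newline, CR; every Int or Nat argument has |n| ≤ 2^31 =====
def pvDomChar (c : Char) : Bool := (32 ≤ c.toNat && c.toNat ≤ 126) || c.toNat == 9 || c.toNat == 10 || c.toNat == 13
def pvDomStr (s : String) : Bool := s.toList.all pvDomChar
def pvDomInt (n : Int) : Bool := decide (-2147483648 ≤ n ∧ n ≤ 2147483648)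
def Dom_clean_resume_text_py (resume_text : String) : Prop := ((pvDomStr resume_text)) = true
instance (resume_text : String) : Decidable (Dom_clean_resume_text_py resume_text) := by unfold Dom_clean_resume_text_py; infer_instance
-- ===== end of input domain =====

-- B replaces A's per-line fold (which inspects the last emitted element) by a run-based scan
-- over the pre-stripped lines; same output, alternative structure.

-- ===== PORT A =====
def clean_resume_text_py (resume_text : String) : String :=
  let lines := (PySem.Str.split? resume_text "\n").getD []
  let cleaned_lines := lines.foldl (fun acc line =>
    let cleaned_line := PySem.Str.strip line
    if cleaned_line ≠ "" then acc ++ [cleaned_line]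
    else if acc ≠ [] ∧ acc.getLastD "" ≠ "" then acc ++ [""]
    else acc) []
  PySem.Str.join "\n" cleaned_lines

-- ===== PORT B =====
-- Source B's outer while loop: consume the maximal run of equally-empty stripped lines at a time
def pvAltGo (out : List String) (l : List String) : List String :=
  match l with
  | [] => out
  | s :: rest =>
    let empty := s == ""
    let run := rest.takeWhile (fun x => (x == "") == empty)
    let rest' := rest.dropWhile (fun x => (x == "") == empty)
    if empty then pvAltGo (if out ≠ [] then out ++ [""] else out) rest'
    else pvAltGo (out ++ s :: run) rest'
termination_by l.length
decreasing_by
  all_goals exact Nat.lt_succ_of_le (List.length_dropWhile_le _ _)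

def clean_resume_text_py_alt (resume_text : String) : String :=
  let stripped := ((PySem.Str.split? resume_text "\n").getD []).map PySem.Str.strip
  PySem.Str.join "\n" (pvAltGo [] stripped)

-- ===== PRECONDITION & SPEC =====
def Spec_clean_resume_text_py (resume_text : String) (out : String) : Prop := out = clean_resume_text_py_alt resume_text
instance (resume_text : String) (out : String) : Decidable (Spec_clean_resume_text_py resume_text out) := by unfold Spec_clean_resume_text_py; infer_instance

-- ===== CLAIM (what is proved, stated in full; the proofs are below) =====
def Claim_equal_clean_resume_text_py : Prop := ∀ (resume_text : String), Dom_clean_resume_text_py resume_text → Spec_clean_resume_text_py resume_text (clean_resume_text_py resume_text)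

-- ===== LEMMAS AND PROOFS =====

-- the canonical remainder: what still gets appended to the output,
-- given whether the output is non-empty with a non-empty last line
def pvTail (b : Bool) : List String → List String
  | [] => []
  | s :: rest => if s = "" then (if b then "" :: pvTail false rest else pvTail false rest)
                 else s :: pvTail true rest

def pvBit (acc : List String) : Bool := decide (acc ≠ [] ∧ acc.getLastD "" ≠ "")

lemma pvTail_nonempty_run (run rest : List String) (h : ∀ x ∈ run, x ≠ "") :
    pvTail true (run ++ rest) = run ++ pvTail true rest := by
  induction run with
  | nil => simp
  | cons a t ih =>
    have ha : a ≠ "" := h a (by simp)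
    simp [pvTail, ha, ih (fun x hx => h x (by simp [hx]))]

lemma pvTail_empty_run (run rest : List String) (h : ∀ x ∈ run, x = "") :
    pvTail false (run ++ rest) = pvTail false rest := by
  induction run with
  | nil => simp
  | cons a t ih =>
    have ha : a = "" := h a (by simp)
    simp [pvTail, ha, ih (fun x hx => h x (by simp [hx]))]

lemma pvGetLastD_append (acc : List String) (s : String) (run : List String) (d : String) :
    (acc ++ s :: run).getLastD d = (s :: run).getLastD d := by
  simp [List.getLastD_eq_getLast?, List.getLast?_append]
  cases h : (s :: run).getLast? with
  | none => simp [List.getLast?_eq_none_iff] at h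
  | some v => simp

lemma pvBit_append_run (acc : List String) (s : String) (run : List String)
    (h : ∀ x ∈ s :: run, x ≠ "") : pvBit (acc ++ s :: run) = true := by
  have hlast : (s :: run).getLastD "" ≠ "" := by
    rw [List.getLastD_eq_getLast?, List.getLast?_eq_some_getLast (by simp)]
    exact h _ (List.getLast_mem _)
  unfold pvBit
  apply decide_eq_true
  exact ⟨by simp, by rw [pvGetLastD_append]; exact hlast⟩

lemma pvBit_append_empty (acc : List String) : pvBit (acc ++ [""]) = false := by
  unfold pvBit
  apply decide_eq_false
  intro hcon
  exact hcon.2 (pvGetLastD_append acc "" [] "")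

-- head of dropWhile fails the predicate (specific shape used below)
lemma pvHead_dropWhile (p : String → Bool) (l : List String) (x : String)
    (h : (l.dropWhile p).head? = some x) : p x = false := by
  induction l with
  | nil => simp at h
  | cons a t ih =>
    by_cases hp : p a
    · rw [List.dropWhile_cons_of_pos hp] at h; exact ih h
    · rw [List.dropWhile_cons_of_neg hp] at h; simp at h; subst h; simpa using hp

-- A's fold over the stripped lines equals acc ++ pvTail (pvBit acc)
lemma pvFoldA_eq (l : List String) : ∀ acc : List String,
    l.foldl (fun acc c =>
      if c ≠ "" then acc ++ [c]
      else if acc ≠ [] ∧ acc.getLastD "" ≠ "" then acc ++ [""]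
      else acc) acc = acc ++ pvTail (pvBit acc) l := by
  induction l with
  | nil => intro acc; simp [pvTail]
  | cons s rest ih =>
    intro acc
    rw [List.foldl_cons]
    by_cases hs : s = ""
    · subst hs
      by_cases hb : acc ≠ [] ∧ acc.getLastD "" ≠ ""
      · have hbit : pvBit acc = true := by unfold pvBit; exact decide_eq_true hb
        rw [show (if ("" : String) ≠ "" then acc ++ [""]
              else if acc ≠ [] ∧ acc.getLastD "" ≠ "" then acc ++ [""] else acc) = acc ++ [""]
            from by rw [if_neg (by simp), if_pos hb]]
        rw [ih, pvBit_append_empty]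
        simp [pvTail, hbit]
      · have hbit : pvBit acc = false := by unfold pvBit; exact decide_eq_false hb
        rw [show (if ("" : String) ≠ "" then acc ++ [""]
              else if acc ≠ [] ∧ acc.getLastD "" ≠ "" then acc ++ [""] else acc) = acc
            from by rw [if_neg (by simp), if_neg hb]]
        rw [ih]
        simp [pvTail, hbit]
    · have hbit : pvBit (acc ++ [s]) = true := pvBit_append_run acc s [] (by simpa using hs)
      rw [show (if s ≠ "" then acc ++ [s]
            else if acc ≠ [] ∧ acc.getLastD "" ≠ "" then acc ++ [""] else acc) = acc ++ [s]
          from if_pos hs]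
      rw [ih, hbit]
      simp [pvTail, hs]

-- invariant: if B's output is non-empty with an empty last line, the next line is non-empty
def pvInv (acc l : List String) : Prop :=
  acc ≠ [] → pvBit acc = true ∨ ∀ s r, l = s :: r → s ≠ ""

-- B's run loop equals acc ++ pvTail (pvBit acc) under the invariant
lemma pvAltGo_eq (acc l : List String) : pvInv acc l →
    pvAltGo acc l = acc ++ pvTail (pvBit acc) l := by
  induction acc, l using pvAltGo.induct with
  | case1 out => intro _; simp [pvAltGo, pvTail]
  | case2 out s rest empty rest' hempty ih =>
    intro hinv
    have hs : s = "" := by simpa [empty] using hempty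
    have hrun : ∀ x ∈ rest.takeWhile (fun x => (x == "") == empty), x = "" := by
      intro x hx
      have := List.mem_takeWhile_imp hx
      simpa [empty, hs] using this
    have hrest : rest = rest.takeWhile (fun x => (x == "") == empty) ++ rest' :=
      (List.takeWhile_append_dropWhile (p := fun x => (x == "") == empty) (l := rest)).symm
    have hhead : ∀ s' r', rest' = s' :: r' → s' ≠ "" := by
      intro s' r' he hs'
      have := pvHead_dropWhile (fun x => (x == "") == empty) rest s'
        (by rw [show rest' = List.dropWhile (fun x => (x == "") == empty) rest from rfl] at he
            simp [he])
      simp [empty, hs, hs'] at this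
    have hempty' : (s == "") = true := hempty
    rw [show pvAltGo out (s :: rest) = pvAltGo (if h : out ≠ [] then out ++ [""] else out) rest'
        from by rw [pvAltGo, if_pos hempty']; (try rfl)]
    by_cases ha : out = []
    · subst ha
      rw [show (if h : ([] : List String) ≠ [] then ([] : List String) ++ [""] else []) = []
          from dif_neg (by simp)] at ih ⊢
      rw [ih (by intro h; simp at h)]
      have hbit : pvBit ([] : List String) = false := by unfold pvBit; simp
      rw [hs]
      conv_rhs => rw [hrest]
      simp [hbit, pvTail, pvTail_empty_run _ _ hrun]
    · have hbit : pvBit out = true := by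
        rcases hinv ha with h | h
        · exact h
        · exact absurd hs (h s rest rfl)
      have hbit' : pvBit (out ++ [""]) = false := pvBit_append_empty out
      rw [dif_pos ha]
      rw [show (if h : out ≠ [] then out ++ [""] else out) = out ++ [""] from dif_pos ha] at ih
      rw [ih (by intro _; right; exact fun s' r' he => hhead s' r' he)]
      rw [hbit', hs]
      conv_rhs => rw [hrest]
      simp [hbit, pvTail, pvTail_empty_run _ _ hrun]
  | case3 out s rest empty run rest' hempty ih =>
    intro hinv
    have hs : s ≠ "" := by simpa [empty] using hempty
    have hrun : ∀ x ∈ run, x ≠ "" := by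
      intro x hx
      have := List.mem_takeWhile_imp (show x ∈ rest.takeWhile (fun x => (x == "") == empty) from hx)
      simpa [empty, hs] using this
    have hrest : rest = run ++ rest' :=
      (List.takeWhile_append_dropWhile (p := fun x => (x == "") == empty) (l := rest)).symm
    have hbit' : pvBit (out ++ s :: run) = true := by
      apply pvBit_append_run
      intro x hx
      rcases List.mem_cons.mp hx with h | h
      · simpa [h] using hs
      · exact hrun x h
    have hempty' : (s == "") = false := by simpa [empty] using hempty
    rw [show pvAltGo out (s :: rest) = pvAltGo (out ++ s :: run) rest'
        from by rw [pvAltGo, if_neg (by simp [hempty'])]]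
    rw [ih (by intro _; left; exact hbit')]
    rw [hbit']
    conv_rhs => rw [hrest]
    simp [pvTail, hs, pvTail_nonempty_run _ _ hrun]

-- ===== VERDICT (by name: the statement is the Claim_ definition above) =====
theorem clean_resume_text_py_spec : Claim_equal_clean_resume_text_py := by
  intro resume_text _
  show PySem.Str.join "\n"
      (((PySem.Str.split? resume_text "\n").getD []).foldl
        (fun acc line =>
          let cleaned_line := PySem.Str.strip line
          if cleaned_line ≠ "" then acc ++ [cleaned_line]
          else if acc ≠ [] ∧ acc.getLastD "" ≠ "" then acc ++ [""] else acc) []) =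
    PySem.Str.join "\n"
      (pvAltGo [] (((PySem.Str.split? resume_text "\n").getD []).map PySem.Str.strip))
  congr 1
  rw [← List.foldl_map (f := PySem.Str.strip)
      (g := fun acc c =>
        if c ≠ "" then acc ++ [c]
        else if acc ≠ [] ∧ acc.getLastD "" ≠ "" then acc ++ [""] else acc)]
  rw [pvFoldA_eq, pvAltGo_eq _ _ (by intro h; simp at h)]
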